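-- pv_equiv track=rewrite | github.com/adma77ya/saywell | backend/app.py | is_proper_word
-- ===== SOURCE A (Python) =====
-- def is_proper_word(word):
--     # Check if word contains numbers
--     if any(char.isdigit() for char in word):
--         return False
--
--     # Check if word is too short (except a, I, A)
--     if len(word) == 1 and word.lower() not in ['a', 'i']:
--         return False
--
--     # Check if word has repeating letters more than twice
--     for i in range(len(word)-2):
--         if word[i] == word[i+1] == word[i+2]:
--             return False
--
--     # Check if word is properly capitalized
--     if word.lower() == 'i' and word != 'I':
--         return False
--
--     return True
-- ===== SOURCE B (Python) =====
-- def is_proper_word(word):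
--     # Single fused pass: digit check and triple-repeat check share one scan,
--     # with a sliding window of the two previous characters.
--     p2 = p1 = None
--     for ch in word:
--         if ch.isdigit():
--             return False
--         if p1 == ch and p2 == ch:
--             return False
--         p2, p1 = p1, ch
--     if len(word) == 1 and word.lower() not in ('a', 'i'):
--         return False
--     if word.lower() == 'i' and word != 'I':
--         return False
--     return True
-- ===== Notes on version B (the rewrite author's own statement) =====
-- stated objective: faster
-- what changed: The separate any(isdigit) scan and the index-based triple-repeat loop (word[i]==word[i+1]==word[i+2]) are fused into one single pass that keeps a sliding window of the two previous characters and returns False immediately on a digit or a third repeat.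
import Mathlib
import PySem

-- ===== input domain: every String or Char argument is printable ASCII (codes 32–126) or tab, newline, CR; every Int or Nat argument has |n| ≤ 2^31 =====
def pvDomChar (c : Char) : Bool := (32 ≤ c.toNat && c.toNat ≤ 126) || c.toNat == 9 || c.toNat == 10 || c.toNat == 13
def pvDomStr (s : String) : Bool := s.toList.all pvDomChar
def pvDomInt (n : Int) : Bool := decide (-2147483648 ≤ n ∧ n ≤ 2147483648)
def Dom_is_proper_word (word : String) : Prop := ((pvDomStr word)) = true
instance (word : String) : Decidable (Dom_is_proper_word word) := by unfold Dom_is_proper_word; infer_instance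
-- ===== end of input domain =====

-- B fuses the two character scans (digit test, triple-repeat test) into one pass that
-- keeps a sliding window of the previous two characters instead of index arithmetic.

-- ===== PORT A =====
-- the 'for i in range(len(word)-2)' loop with its early return False
def pvTripleScanA (cs : List Char) : List Int → Bool
  | [] => false
  | i :: rest =>
    if (PySem.List.pyGet? cs i == PySem.List.pyGet? cs (i + 1))
        && (PySem.List.pyGet? cs (i + 1) == PySem.List.pyGet? cs (i + 2)) then true
    else pvTripleScanA cs rest

def is_proper_word (word : String) : Bool :=
  let cs := word.toList
  if cs.any PySem.Chars.isdigit then false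
  else if cs.length == 1
      && !(PySem.Chars.lower cs == ['a'] || PySem.Chars.lower cs == ['i']) then false
  else if pvTripleScanA cs (PySem.List.pyRange 0 ((cs.length : Int) - 2) 1) then false
  else if (PySem.Chars.lower cs == ['i']) && !(cs == ['I']) then false
  else true

-- ===== PORT B =====
-- the fused loop: args are (chars left, prev-prev char, prev char)
def pvScanB : List Char → Option Char → Option Char → Bool
  | [], _, _ => true
  | c :: rest, p2, p1 =>
    if PySem.Chars.isdigit c then false
    else if (p1 == some c) && (p2 == some c) then false
    else pvScanB rest p1 (some c)

def is_proper_word_alt (word : String) : Bool :=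
  let cs := word.toList
  if !pvScanB cs none none then false
  else if cs.length == 1
      && !(PySem.Chars.lower cs == ['a'] || PySem.Chars.lower cs == ['i']) then false
  else if (PySem.Chars.lower cs == ['i']) && !(cs == ['I']) then false
  else true

-- ===== PRECONDITION & SPEC =====
def Spec_is_proper_word (word : String) (out : Bool) : Prop := out = is_proper_word_alt word
instance (word : String) (out : Bool) : Decidable (Spec_is_proper_word word out) := by unfold Spec_is_proper_word; infer_instance

-- ===== CLAIM (what is proved, stated in full; the proofs are below) =====
def Claim_equal_is_proper_word : Prop := ∀ (word : String), Dom_is_proper_word word → Spec_is_proper_word word (is_proper_word word)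

-- ===== LEMMAS AND PROOFS =====

-- reference predicate: some three consecutive equal characters
def pvTrip : List Char → Bool
  | a :: b :: c :: t => ((a == b) && (b == c)) || pvTrip (b :: c :: t)
  | _ => false

-- window form of the same predicate
def pvTripW : Option Char → Option Char → List Char → Bool
  | _, _, [] => false
  | a?, b?, c :: t => ((b? == some c) && (a? == some c)) || pvTripW b? (some c) t

lemma pvScanB_eq (cs : List Char) : ∀ (a b : Option Char),
    pvScanB cs a b = !(cs.any PySem.Chars.isdigit || pvTripW a b cs) := by
  induction cs with
  | nil => intro a b; simp [pvScanB, pvTripW]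
  | cons c t ih =>
    intro a b
    by_cases hd : PySem.Chars.isdigit c
    · simp [pvScanB, pvTripW, hd]
    · by_cases hw : ((b == some c) && (a == some c)) = true
      · simp [pvScanB, pvTripW, hd, hw]
      · simp only [pvScanB, pvTripW, hd, hw, ih]
        simp [hd]

lemma pvTripW_some (t : List Char) : ∀ (a b : Char),
    pvTripW (some a) (some b) t = pvTrip (a :: b :: t) := by
  induction t with
  | nil => intro a b; simp [pvTripW, pvTrip]
  | cons c t ih =>
    intro a b
    simp only [pvTripW, pvTrip, ih]
    cases hbc : (b == c)
    · simp [hbc]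
    · have : b = c := by simpa using hbc
      subst this
      simp [Bool.and_comm]

lemma pvTripW_none (cs : List Char) : pvTripW none none cs = pvTrip cs := by
  match cs with
  | [] => simp [pvTripW, pvTrip]
  | [c] => simp [pvTripW, pvTrip]
  | c :: d :: t => simp [pvTripW, pvTripW_some]

lemma pvTrip_short (l : List Char) (h : l.length ≤ 2) : pvTrip l = false := by
  match l, h with
  | [], _ => rfl
  | [_], _ => rfl
  | [_, _], _ => rfl

lemma pvScanA_drop (k : Nat) : ∀ (cs : List Char) (j : Nat), cs.length - j ≤ k →
    pvTripleScanA cs (PySem.List.pyRange (j : Int) ((cs.length : Int) - 2) 1)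
      = pvTrip (cs.drop j) := by
  induction k with
  | zero =>
    intro cs j h
    have hj : cs.length ≤ j := by omega
    rw [PySem.List.pyRange_one_eq_nil (by omega)]
    rw [List.drop_eq_nil_of_le hj]
    rfl
  | succ k ih =>
    intro cs j h
    by_cases hlt : (j : Int) < (cs.length : Int) - 2
    · have hj2 : j + 2 < cs.length := by omega
      rw [PySem.List.pyRange_one_cons hlt]
      have h0 : PySem.List.pyGet? cs (j : Int) = some cs[j] := by
        simp [pysem]
      have h1 : PySem.List.pyGet? cs ((j : Int) + 1) = some cs[j + 1] := by
        have hc : (j : Int) + 1 = ((j + 1 : Nat) : Int) := by push_cast; ring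
        rw [hc, PySem.List.pyGet?_natCast]
        exact List.getElem?_eq_getElem (by omega)
      have h2 : PySem.List.pyGet? cs ((j : Int) + 2) = some cs[j + 2] := by
        have hc : (j : Int) + 2 = ((j + 2 : Nat) : Int) := by push_cast; ring
        rw [hc, PySem.List.pyGet?_natCast]
        exact List.getElem?_eq_getElem (by omega)
      have e1 : cs.drop j = cs[j] :: cs.drop (j + 1) := List.drop_eq_getElem_cons (by omega)
      have e2 : cs.drop (j + 1) = cs[j + 1] :: cs.drop (j + 2) := List.drop_eq_getElem_cons (by omega)
      have e3 : cs.drop (j + 2) = cs[j + 2] :: cs.drop (j + 3) := List.drop_eq_getElem_cons (by omega)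
      have hdj : cs.drop j = cs[j] :: cs[j + 1] :: cs[j + 2] :: cs.drop (j + 3) := by
        rw [e1, e2, e3]
      have hrec : pvTripleScanA cs (PySem.List.pyRange ((j : Int) + 1) ((cs.length : Int) - 2) 1)
          = pvTrip (cs.drop (j + 1)) := by
        have : (j : Int) + 1 = ((j + 1 : Nat) : Int) := by push_cast; ring
        rw [this]; exact ih cs (j + 1) (by omega)
      have hdj1 : cs.drop (j + 1) = cs[j + 1] :: cs[j + 2] :: cs.drop (j + 3) := by
        rw [e2, e3]
      rw [hdj]
      simp only [pvTripleScanA, h0, h1, h2, pvTrip, hrec, hdj1]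
      by_cases hab : (cs[j] == cs[j + 1] && (cs[j + 1] == cs[j + 2])) = true
      · simp [hab]
      · simp [Bool.eq_false_iff.mpr hab]
    · rw [PySem.List.pyRange_one_eq_nil (by omega)]
      rw [pvTrip_short _ (by simp; omega)]
      rfl

-- ===== VERDICT (by name: the statement is the Claim_ definition above) =====
theorem is_proper_word_spec : Claim_equal_is_proper_word := by
  intro word _
  unfold Spec_is_proper_word is_proper_word is_proper_word_alt
  simp only [pvScanB_eq, pvTripW_none]
  rw [show ((0 : Int) = ((0 : Nat) : Int)) from rfl,
      pvScanA_drop (word.toList.length) word.toList 0 (by omega)]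
  simp only [List.drop_zero]
  by_cases hd : word.toList.any PySem.Chars.isdigit = true <;>
    by_cases ht : pvTrip word.toList = true <;>
      simp [hd, ht]
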